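-- pv_equiv track=rewrite | github.com/yeongseon/excel-dbapi | src/excel_dbapi/parser.py | _find_clause_positions
-- ===== SOURCE A (Python) =====
-- from typing import Any, Dict, List, Optional, SupportsIndex, Union
--
-- def _is_quoted_token(token: str) -> bool:
--     return len(token) >= 2 and (
--         (token.startswith("'") and token.endswith("'"))
--         or (token.startswith('"') and token.endswith('"'))
--     )
--
-- def _find_clause_positions(tokens: List[str]) -> Dict[str, int]:
--     positions: Dict[str, int] = {}
--     index = 0
--     paren_depth = 0
--     while index < len(tokens):
--         token = tokens[index]
--         if _is_quoted_token(token):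
--             index += 1
--             continue
--
--         if token == "(":
--             paren_depth += 1
--             index += 1
--             continue
--         if token == ")":
--             if paren_depth > 0:
--                 paren_depth -= 1
--             index += 1
--             continue
--
--         if paren_depth > 0:
--             index += 1
--             continue
--
--         upper = token.upper()
--         if upper == "WHERE" and "WHERE" not in positions:
--             positions["WHERE"] = index
--         elif (
--             upper == "GROUP"
--             and index + 1 < len(tokens)
--             and tokens[index + 1].upper() == "BY"
--             and "GROUP BY" not in positions
--         ):
--             positions["GROUP BY"] = index
--             index += 1
--         elif upper == "HAVING" and "HAVING" not in positions:
--             positions["HAVING"] = index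
--         elif (
--             upper == "ORDER"
--             and index + 1 < len(tokens)
--             and tokens[index + 1].upper() == "BY"
--             and "ORDER BY" not in positions
--         ):
--             positions["ORDER BY"] = index
--             index += 1
--         elif upper == "LIMIT" and "LIMIT" not in positions:
--             positions["LIMIT"] = index
--         elif upper == "OFFSET" and "OFFSET" not in positions:
--             positions["OFFSET"] = index
--
--         index += 1
--
--     return positions
-- ===== SOURCE B (Python) =====
-- def _is_quoted_token(token: str) -> bool:
--     return len(token) >= 2 and (
--         (token.startswith("'") and token.endswith("'"))
--         or (token.startswith('"') and token.endswith('"'))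
--     )
--
-- def _find_clause_positions(tokens):
--     # Pass 1: indices of unquoted tokens at paren depth 0.
--     active = []
--     depth = 0
--     for i, token in enumerate(tokens):
--         if _is_quoted_token(token):
--             continue
--         if token == "(":
--             depth += 1
--         elif token == ")":
--             depth = max(depth - 1, 0)
--         elif depth == 0:
--             active.append(i)
--     # Pass 2: match clause keywords at the active indices, first occurrence wins.
--     positions = {}
--     for i in active:
--         upper = tokens[i].upper()
--         if upper in ("GROUP", "ORDER"):
--             if i + 1 < len(tokens) and tokens[i + 1].upper() == "BY":
--                 positions.setdefault(upper + " BY", i)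
--         elif upper in ("WHERE", "HAVING", "LIMIT", "OFFSET"):
--             positions.setdefault(upper, i)
--     return positions
-- ===== Notes on version B (the rewrite author's own statement) =====
-- stated objective: alternative
-- what changed: Replaces A's single stateful while-loop (dict building, paren tracking and the GROUP/ORDER index skip interleaved) by two passes: one pass collects the indices of unquoted depth-0 tokens, a second pass matches clause keywords at those indices with dict.setdefault, looking at the raw next token for the two-word clauses.
import Mathlib
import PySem

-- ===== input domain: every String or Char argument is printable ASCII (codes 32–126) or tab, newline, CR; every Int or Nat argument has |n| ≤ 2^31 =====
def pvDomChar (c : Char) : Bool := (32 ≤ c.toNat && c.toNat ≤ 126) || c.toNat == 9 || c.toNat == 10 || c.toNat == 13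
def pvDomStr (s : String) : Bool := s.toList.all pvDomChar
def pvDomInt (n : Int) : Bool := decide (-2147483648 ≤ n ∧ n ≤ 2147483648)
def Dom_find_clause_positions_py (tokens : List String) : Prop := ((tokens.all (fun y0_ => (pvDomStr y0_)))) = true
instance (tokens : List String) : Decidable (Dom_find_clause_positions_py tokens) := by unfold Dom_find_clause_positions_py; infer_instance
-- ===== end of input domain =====

-- B changes A's decomposition (two passes: active-index collection, then keyword matching) — same behaviour, same O(n) cost.

-- ===== PORT A =====
-- shared module helper _is_quoted_token
def pvIsQuoted (token : String) : Bool :=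
  decide (2 ≤ PySem.Str.len token) &&
    ((PySem.Str.startswith token "'" && PySem.Str.endswith token "'")
      || (PySem.Str.startswith token "\"" && PySem.Str.endswith token "\""))

-- the while-loop of _find_clause_positions, step for step (fuel = one unit per iteration,
-- started at tokens.length, which the loop never exhausts since index grows each iteration)
def find_clause_positions_py_go (tokens : List String) (positions : PySem.Dict String Int)
    (fuel index paren_depth : Nat) : PySem.Dict String Int :=
  match fuel with
  | 0 => positions
  | fuel + 1 =>
  if h : index < tokens.length then
    let token := tokens[index]
    if pvIsQuoted token then
      find_clause_positions_py_go tokens positions fuel (index + 1) paren_depth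
    else if token = "(" then
      find_clause_positions_py_go tokens positions fuel (index + 1) (paren_depth + 1)
    else if token = ")" then
      find_clause_positions_py_go tokens positions fuel (index + 1)
        (if paren_depth > 0 then paren_depth - 1 else paren_depth)
    else if paren_depth > 0 then
      find_clause_positions_py_go tokens positions fuel (index + 1) paren_depth
    else
      let upper := PySem.Str.upper token
      if upper = "WHERE" ∧ positions.contains "WHERE" = false then
        find_clause_positions_py_go tokens (positions.insert "WHERE" (index : Int)) fuel (index + 1) paren_depth
      else if upper = "GROUP" ∧ index + 1 < tokens.length
          ∧ PySem.Str.upper (tokens.getD (index + 1) "") = "BY"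
          ∧ positions.contains "GROUP BY" = false then
        find_clause_positions_py_go tokens (positions.insert "GROUP BY" (index : Int)) fuel (index + 2) paren_depth
      else if upper = "HAVING" ∧ positions.contains "HAVING" = false then
        find_clause_positions_py_go tokens (positions.insert "HAVING" (index : Int)) fuel (index + 1) paren_depth
      else if upper = "ORDER" ∧ index + 1 < tokens.length
          ∧ PySem.Str.upper (tokens.getD (index + 1) "") = "BY"
          ∧ positions.contains "ORDER BY" = false then
        find_clause_positions_py_go tokens (positions.insert "ORDER BY" (index : Int)) fuel (index + 2) paren_depth
      else if upper = "LIMIT" ∧ positions.contains "LIMIT" = false then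
        find_clause_positions_py_go tokens (positions.insert "LIMIT" (index : Int)) fuel (index + 1) paren_depth
      else if upper = "OFFSET" ∧ positions.contains "OFFSET" = false then
        find_clause_positions_py_go tokens (positions.insert "OFFSET" (index : Int)) fuel (index + 1) paren_depth
      else
        find_clause_positions_py_go tokens positions fuel (index + 1) paren_depth
  else positions

def find_clause_positions_py (tokens : List String) : List (String × Int) :=
  (find_clause_positions_py_go tokens PySem.Dict.empty tokens.length 0 0).items

-- ===== PORT B =====
-- pass 1 body: fold over enumerate(tokens), state = (paren depth, active indices)
def pvFirstPassStep (st : Nat × List Int) (p : Int × String) : Nat × List Int :=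
  if pvIsQuoted p.2 then st
  else if p.2 = "(" then (st.1 + 1, st.2)
  else if p.2 = ")" then (max (st.1 - 1) 0, st.2)
  else if st.1 = 0 then (st.1, st.2 ++ [p.1])
  else st

-- pass 2 body: match the clause keywords at an active index
def pvMatchStep (tokens : List String) (positions : PySem.Dict String Int) (i : Int) : PySem.Dict String Int :=
  let upper := PySem.Str.upper (PySem.List.pyGetD tokens i "")
  if upper = "GROUP" ∨ upper = "ORDER" then
    if i + 1 < PySem.List.len tokens ∧ PySem.Str.upper (PySem.List.pyGetD tokens (i + 1) "") = "BY" then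
      PySem.Dict.setdefault positions (upper ++ " BY") i
    else positions
  else if upper = "WHERE" ∨ upper = "HAVING" ∨ upper = "LIMIT" ∨ upper = "OFFSET" then
    PySem.Dict.setdefault positions upper i
  else positions

def find_clause_positions_py_alt (tokens : List String) : List (String × Int) :=
  let active := ((PySem.List.enumerate tokens).foldl pvFirstPassStep (0, [])).2
  (active.foldl (pvMatchStep tokens) PySem.Dict.empty).items

-- ===== PRECONDITION & SPEC =====
def Spec_find_clause_positions_py (tokens : List String) (out : List (String × Int)) : Prop := out = find_clause_positions_py_alt tokens
instance (tokens : List String) (out : List (String × Int)) : Decidable (Spec_find_clause_positions_py tokens out) := by unfold Spec_find_clause_positions_py; infer_instance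

-- ===== CLAIM (what is proved, stated in full; the proofs are below) =====
def Claim_equal_find_clause_positions_py : Prop := ∀ (tokens : List String), Dom_find_clause_positions_py tokens → Spec_find_clause_positions_py tokens (find_clause_positions_py tokens)

-- ===== LEMMAS AND PROOFS =====

-- the list of active indices from position `index` on, at paren depth `depth`
def pvActiveRec (rest : List String) (s : Int) (depth : Nat) : List Int :=
  match rest with
  | [] => []
  | t :: ts =>
    if pvIsQuoted t then pvActiveRec ts (s + 1) depth
    else if t = "(" then pvActiveRec ts (s + 1) (depth + 1)
    else if t = ")" then pvActiveRec ts (s + 1) (depth - 1)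
    else if depth = 0 then s :: pvActiveRec ts (s + 1) depth
    else pvActiveRec ts (s + 1) depth

lemma pvActiveRec_quoted {t : String} (ts : List String) (s : Int) (d : Nat)
    (hq : pvIsQuoted t = true) : pvActiveRec (t :: ts) s d = pvActiveRec ts (s + 1) d := by
  simp [pvActiveRec, hq]

lemma pvActiveRec_lparen {t : String} (ts : List String) (s : Int) (d : Nat)
    (hq : pvIsQuoted t = false) (h1 : t = "(") :
    pvActiveRec (t :: ts) s d = pvActiveRec ts (s + 1) (d + 1) := by
  subst h1; simp [pvActiveRec, hq]

lemma pvActiveRec_rparen {t : String} (ts : List String) (s : Int) (d : Nat)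
    (hq : pvIsQuoted t = false) (h2 : t = ")") :
    pvActiveRec (t :: ts) s d = pvActiveRec ts (s + 1) (d - 1) := by
  subst h2; simp [pvActiveRec, hq]

lemma pvActiveRec_deep {t : String} (ts : List String) (s : Int) (d : Nat)
    (hq : pvIsQuoted t = false) (h1 : t ≠ "(") (h2 : t ≠ ")") (hd : d ≠ 0) :
    pvActiveRec (t :: ts) s d = pvActiveRec ts (s + 1) d := by
  simp [pvActiveRec, hq, h1, h2, hd]

lemma pvActiveRec_active {t : String} (ts : List String) (s : Int)
    (hq : pvIsQuoted t = false) (h1 : t ≠ "(") (h2 : t ≠ ")") :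
    pvActiveRec (t :: ts) s 0 = s :: pvActiveRec ts (s + 1) 0 := by
  simp [pvActiveRec, hq, h1, h2]

lemma pvFirstPass_eq (rest : List String) : ∀ (s : Int) (d : Nat) (acc : List Int),
    ((PySem.List.enumerate rest s).foldl pvFirstPassStep (d, acc)).2 = acc ++ pvActiveRec rest s d := by
  induction rest with
  | nil => intro s d acc; simp [PySem.List.enumerate_nil, pvActiveRec]
  | cons t ts ih =>
    intro s d acc
    rw [PySem.List.enumerate_cons]
    simp only [List.foldl_cons, pvFirstPassStep, pvActiveRec]
    by_cases hq : pvIsQuoted t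
    · simp only [hq, if_true]
      exact ih _ _ _
    · simp only [hq, Bool.false_eq_true, if_false]
      by_cases h1 : t = "("
      · simp only [h1, if_true]
        exact ih _ _ _
      · simp only [h1, if_false]
        by_cases h2 : t = ")"
        · simp only [h2, if_true]
          simpa using ih (s + 1) (d - 1) acc
        · simp only [h2, if_false]
          by_cases h3 : d = 0
          · simp only [h3, if_true]
            rw [ih]; simp
          · simp only [h3, if_false]
            exact ih _ _ _

-- a token whose .upper() is "BY" is unquoted and is not a parenthesis
lemma pvBY_facts (t : String) (h : PySem.Str.upper t = "BY") :
    pvIsQuoted t = false ∧ t ≠ "(" ∧ t ≠ ")" := by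
  have hl : t.toList.map PySem.Chars.upperChar = ['B', 'Y'] := by
    have h2 := congrArg String.toList h
    rw [PySem.Str.toList_upper] at h2
    simpa [PySem.Chars.upper] using h2
  have hlen : t.toList.length = 2 := by
    have := congrArg List.length hl; simpa using this
  obtain ⟨c1, c2, htl⟩ := List.length_eq_two.mp hlen
  rw [htl] at hl
  simp only [List.map_cons, List.map_nil, List.cons.injEq, and_true] at hl
  obtain ⟨h1, h2⟩ := hl
  have hc1 : c1 ≠ '\'' := by rintro rfl; exact absurd h1 (by decide)
  have hc2 : c1 ≠ '"' := by rintro rfl; exact absurd h1 (by decide)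
  have hs1 : PySem.Chars.startswith t.toList ['\''] = false := by
    rw [htl]
    simp [PySem.Chars.startswith, List.isPrefixOf]
    exact fun e => hc1 e.symm
  have hs2 : PySem.Chars.startswith t.toList ['"'] = false := by
    rw [htl]
    simp [PySem.Chars.startswith, List.isPrefixOf]
    exact fun e => hc2 e.symm
  refine ⟨by simp [pvIsQuoted, hs1, hs2], ?_, ?_⟩
  · rintro rfl; exact absurd hlen (by decide)
  · rintro rfl; exact absurd hlen (by decide)

lemma pvNat_add_one (i : Nat) : ((i : Int) + 1) = ((i + 1 : Nat) : Int) := by push_cast; ring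

-- one step of pass 2 at a real index i < len, with Python's indexing resolved
lemma pvMatchStep_eq (tokens : List String) (p : PySem.Dict String Int) (i : Nat) (hi : i < tokens.length) :
    pvMatchStep tokens p i =
      (if PySem.Str.upper tokens[i] = "GROUP" ∨ PySem.Str.upper tokens[i] = "ORDER" then
        if i + 1 < tokens.length ∧ PySem.Str.upper (tokens.getD (i + 1) "") = "BY" then
          PySem.Dict.setdefault p (PySem.Str.upper tokens[i] ++ " BY") (i : Int)
        else p
      else if PySem.Str.upper tokens[i] = "WHERE" ∨ PySem.Str.upper tokens[i] = "HAVING"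
          ∨ PySem.Str.upper tokens[i] = "LIMIT" ∨ PySem.Str.upper tokens[i] = "OFFSET" then
        PySem.Dict.setdefault p (PySem.Str.upper tokens[i]) (i : Int)
      else p) := by
  have hg : PySem.List.pyGetD tokens (i : Int) "" = tokens[i] := by
    simp [PySem.List.pyGetD_natCast, List.getD_eq_getElem?_getD, hi]
  have hg1 : PySem.List.pyGetD tokens ((i : Int) + 1) "" = tokens.getD (i + 1) "" := by
    rw [pvNat_add_one, PySem.List.pyGetD_natCast]
  have hlt : ((i : Int) + 1 < PySem.List.len tokens) ↔ (i + 1 < tokens.length) := by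
    simp [PySem.List.len_eq]; omega
  simp only [pvMatchStep, hg, hg1, hlt]

lemma pvGo_eq (tokens : List String) : ∀ (n i d : Nat) (p : PySem.Dict String Int),
    tokens.length - i ≤ n →
    find_clause_positions_py_go tokens p n i d
      = (pvActiveRec (tokens.drop i) i d).foldl (pvMatchStep tokens) p := by
  intro n
  induction n with
  | zero =>
    intro i d p hn
    rw [List.drop_of_length_le (by omega)]
    simp [find_clause_positions_py_go, pvActiveRec]
  | succ n ih =>
    intro i d p hn
    by_cases hi : i < tokens.length
    case neg =>
      rw [List.drop_of_length_le (by omega)]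
      simp [find_clause_positions_py_go, hi, pvActiveRec]
    simp only [find_clause_positions_py_go]
    rw [dif_pos hi, List.drop_eq_getElem_cons hi]
    set t := tokens[i] with ht
    have ihS : ∀ (d' : Nat) (p' : PySem.Dict String Int),
        find_clause_positions_py_go tokens p' n (i + 1) d'
          = (pvActiveRec (tokens.drop (i + 1)) ((i : Int) + 1) d').foldl (pvMatchStep tokens) p' := by
      intro d' p'
      rw [pvNat_add_one]
      exact ih (i + 1) d' p' (by omega)
    by_cases hq : pvIsQuoted t
    · rw [if_pos hq, pvActiveRec_quoted _ _ _ hq, ihS]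
    rw [if_neg hq]
    rw [Bool.not_eq_true] at hq
    by_cases h1 : t = "("
    · rw [if_pos h1, pvActiveRec_lparen _ _ _ hq h1, ihS]
    rw [if_neg h1]
    by_cases h2 : t = ")"
    · have hdd : (if d > 0 then d - 1 else d) = d - 1 := by split <;> omega
      rw [if_pos h2, hdd, pvActiveRec_rparen _ _ _ hq h2, ihS]
    rw [if_neg h2]
    by_cases hd : d > 0
    · rw [if_pos hd, pvActiveRec_deep _ _ _ hq h1 h2 (by omega), ihS]
    rw [if_neg hd]
    have hd0 : d = 0 := by omega
    subst hd0
    rw [pvActiveRec_active _ _ hq h1 h2, List.foldl_cons, pvMatchStep_eq tokens p i hi, ← ht]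
    -- one helper for the two-word clauses: pass 2 skips nothing, but the raw "BY" token is a no-op
    have hBY : ∀ (p' : PySem.Dict String Int),
        i + 1 < tokens.length → PySem.Str.upper (tokens.getD (i + 1) "") = "BY" →
        find_clause_positions_py_go tokens p' n (i + 2) 0
          = (pvActiveRec (tokens.drop (i + 1)) ((i : Int) + 1) 0).foldl (pvMatchStep tokens) p' := by
      intro p' hi1 hby
      have hgd : tokens.getD (i + 1) "" = tokens[i + 1] := List.getD_eq_getElem _ _ hi1
      rw [hgd] at hby
      obtain ⟨hq', h1', h2'⟩ := pvBY_facts _ hby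
      rw [List.drop_eq_getElem_cons hi1, pvNat_add_one, pvActiveRec_active _ _ hq' h1' h2',
        List.foldl_cons]
      have hstep : pvMatchStep tokens p' ((i + 1 : Nat) : Int) = p' := by
        rw [pvMatchStep_eq tokens p' (i + 1) hi1]
        simp [hby]
      rw [hstep, pvNat_add_one]
      exact ih (i + 2) 0 p' (by omega)
    by_cases hw : PySem.Str.upper t = "WHERE"
    · by_cases hc : p.contains "WHERE" = false
      · simp [hw, hc, PySem.Dict.setdefault_of_not_contains, ihS]
      · have hcc : p.contains "WHERE" = true := by revert hc; cases p.contains "WHERE" <;> simp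
        simp [hw, hcc, PySem.Dict.setdefault_of_contains, ihS]
    by_cases hgr : PySem.Str.upper t = "GROUP"
    · by_cases hby : i + 1 < tokens.length ∧ PySem.Str.upper (tokens[i + 1]?.getD "") = "BY"
      · have hg2 : PySem.Str.upper tokens[i + 1] = "BY" := by
          simpa [List.getElem?_eq_getElem hby.1] using hby.2
        by_cases hc : p.contains "GROUP BY" = false
        · simp [hgr, hby.1, hg2, hc, PySem.Dict.setdefault_of_not_contains,
            hBY _ hby.1 hby.2]
        · have hcc : p.contains "GROUP BY" = true := by revert hc; cases p.contains "GROUP BY" <;> simp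
          simp [hgr, hby.1, hg2, hcc, PySem.Dict.setdefault_of_contains, ihS]
      · have hby4 : ¬ (i + 1 < tokens.length ∧ PySem.Str.upper (tokens[i + 1]?.getD "") = "BY"
            ∧ p.contains "GROUP BY" = false) := fun ⟨a, b, _⟩ => hby ⟨a, b⟩
        simp [hgr, hby, hby4, ihS]
    by_cases hh : PySem.Str.upper t = "HAVING"
    · by_cases hc : p.contains "HAVING" = false
      · simp [hh, hc, PySem.Dict.setdefault_of_not_contains, ihS]
      · have hcc : p.contains "HAVING" = true := by revert hc; cases p.contains "HAVING" <;> simp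
        simp [hh, hcc, PySem.Dict.setdefault_of_contains, ihS]
    by_cases hor : PySem.Str.upper t = "ORDER"
    · by_cases hby : i + 1 < tokens.length ∧ PySem.Str.upper (tokens[i + 1]?.getD "") = "BY"
      · have hg2 : PySem.Str.upper tokens[i + 1] = "BY" := by
          simpa [List.getElem?_eq_getElem hby.1] using hby.2
        by_cases hc : p.contains "ORDER BY" = false
        · simp [hor, hby.1, hg2, hc, PySem.Dict.setdefault_of_not_contains,
            hBY _ hby.1 hby.2]
        · have hcc : p.contains "ORDER BY" = true := by revert hc; cases p.contains "ORDER BY" <;> simp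
          simp [hor, hby.1, hg2, hcc, PySem.Dict.setdefault_of_contains, ihS]
      · have hby4 : ¬ (i + 1 < tokens.length ∧ PySem.Str.upper (tokens[i + 1]?.getD "") = "BY"
            ∧ p.contains "ORDER BY" = false) := fun ⟨a, b, _⟩ => hby ⟨a, b⟩
        simp [hor, hby, hby4, ihS]
    by_cases hli : PySem.Str.upper t = "LIMIT"
    · by_cases hc : p.contains "LIMIT" = false
      · simp [hli, hc, PySem.Dict.setdefault_of_not_contains, ihS]
      · have hcc : p.contains "LIMIT" = true := by revert hc; cases p.contains "LIMIT" <;> simp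
        simp [hli, hcc, PySem.Dict.setdefault_of_contains, ihS]
    by_cases hof : PySem.Str.upper t = "OFFSET"
    · by_cases hc : p.contains "OFFSET" = false
      · simp [hof, hc, PySem.Dict.setdefault_of_not_contains, ihS]
      · have hcc : p.contains "OFFSET" = true := by revert hc; cases p.contains "OFFSET" <;> simp
        simp [hof, hcc, PySem.Dict.setdefault_of_contains, ihS]
    · simp [hw, hgr, hh, hor, hli, hof, ihS]

-- ===== VERDICT (by name: the statement is the Claim_ definition above) =====
theorem find_clause_positions_py_spec : Claim_equal_find_clause_positions_py := by
  intro tokens _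
  unfold Spec_find_clause_positions_py find_clause_positions_py find_clause_positions_py_alt
  rw [pvGo_eq tokens tokens.length 0 0 PySem.Dict.empty (by omega)]
  simp only []
  rw [pvFirstPass_eq tokens 0 0 []]
  simp
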